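-- pv_equiv track=rewrite | github.com/bayhiker/python-algorithms | leetcode/lc_2500/lc_2518.py | count_partitions_dp
-- ===== SOURCE A (Python) =====
-- def count_partitions_dp(nums: list[int], k: int) -> int:
--     # https://github.com/doocs/leetcode/blob/main/solution/2500-2599/2518.Number%20of%20Great%20Partitions/README.md
--     if sum(nums) < k * 2:
--         return 0
--     mod = 10**9 + 7
--     n = len(nums)
--     f = [[0] * k for _ in range(n + 1)]
--     f[0][0] = 1
--     ans = 1
--     for i in range(1, n + 1):
--         ans = ans * 2 % mod
--         for j in range(k):
--             f[i][j] = f[i - 1][j]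
--             if j >= nums[i - 1]:
--                 f[i][j] = (f[i][j] + f[i - 1][j - nums[i - 1]]) % mod
--     return (ans - sum(f[-1]) * 2 + mod) % mod
-- ===== SOURCE B (Python) =====
-- def count_partitions_dp(nums: list[int], k: int) -> int:
--     # Top-down memoized recursion over (index, accumulated sum) counting subsets whose
--     # sum stays below k, instead of A's bottom-up (n+1) x k table; 2^n by modular pow.
--     if sum(nums) < k * 2:
--         return 0
--     mod = 10**9 + 7
--     n = len(nums)
--     memo = {}
--
--     def small(i, s):
--         if s >= k:
--             return 0
--         if i == n:
--             return 1
--         key = (i, s)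
--         if key not in memo:
--             memo[key] = (small(i + 1, s) + small(i + 1, s + nums[i])) % mod
--         return memo[key]
--
--     return (pow(2, n, mod) - 2 * small(0, 0)) % mod
-- ===== Notes on version B (the rewrite author's own statement) =====
-- stated objective: alternative
-- what changed: Replaces A's bottom-up (n+1)-by-k DP table filled row by row with a top-down memoized recursion over (item index, accumulated sum) counting subsets whose sum stays below k, and computes the 2^n factor by modular exponentiation instead of accumulated doubling.
import Mathlib
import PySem

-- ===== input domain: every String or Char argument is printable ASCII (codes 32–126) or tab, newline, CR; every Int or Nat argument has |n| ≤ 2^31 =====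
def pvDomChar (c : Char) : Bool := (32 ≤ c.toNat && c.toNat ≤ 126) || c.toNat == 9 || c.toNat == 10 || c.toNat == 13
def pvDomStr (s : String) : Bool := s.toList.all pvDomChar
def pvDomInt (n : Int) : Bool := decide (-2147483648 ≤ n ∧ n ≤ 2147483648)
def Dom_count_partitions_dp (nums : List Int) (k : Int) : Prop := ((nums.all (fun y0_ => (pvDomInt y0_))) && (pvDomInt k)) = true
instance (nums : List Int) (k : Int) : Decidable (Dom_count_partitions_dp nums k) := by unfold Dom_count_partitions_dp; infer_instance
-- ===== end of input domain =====

-- B replaces A's bottom-up (n+1)×k table by a top-down memoized recursion over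
-- (index, accumulated sum) and modular exponentiation for 2^n (objective: alternative).

-- ===== PORT A =====
-- Python's preallocated table rows f[1..n] are assigned strictly in index order and only
-- f[i-1] is ever read, so the table is ported as the list of filled rows, each new row appended.
def count_partitions_dp (nums : List Int) (k : Int) : Int :=
  if nums.sum < k * 2 then 0
  else
    let P : Int := 1000000007
    let n : Nat := nums.length
    -- f[0] = [0]*k with f[0][0] = 1 (IndexError for k < 1 is outside Pre_)
    let row0 : List Int := PySem.List.pySetD (List.replicate k.toNat 0) 0 1
    let st : List (List Int) × Int :=
      (PySem.List.pyRange 1 ((n : Int) + 1) 1).foldl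
        (fun st i =>
          let ans := PySem.Int.mod (st.2 * 2) P
          let prev := PySem.List.pyGetD st.1 (i - 1) []
          let x := PySem.List.pyGetD nums (i - 1) 0
          let row := (PySem.List.pyRange 0 k 1).foldl
            (fun row j =>
              let v := PySem.List.pyGetD prev j 0
              let v := if x ≤ j then PySem.Int.mod (v + PySem.List.pyGetD prev (j - x) 0) P else v
              row ++ [v]) []
          (st.1 ++ [row], ans))
        ([row0], 1)
    PySem.Int.mod (st.2 - (PySem.List.pyGetD st.1 (-1) []).sum * 2 + P) P

-- ===== PORT B =====
-- The closure small(i, s) recurses on the remaining suffix of nums (so i == n becomes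
-- the [] case) while the memo dict, keyed by (i, s) exactly as in Python, is threaded
-- through the recursion in call order.
def altSmall (k P : Int) : List Int → Int → Int → PySem.Dict (Int × Int) Int →
    Int × PySem.Dict (Int × Int) Int
  | l, i, s, memo =>
    if k ≤ s then (0, memo)
    else
      match l with
      | [] => (1, memo)
      | x :: t =>
        match memo.get? (i, s) with
        | some v => (v, memo)
        | none =>
          let r1 := altSmall k P t (i + 1) s memo
          let r2 := altSmall k P t (i + 1) (s + x) r1.2
          let v := PySem.Int.mod (r1.1 + r2.1) P
          (v, r2.2.insert (i, s) v)

def count_partitions_dp_alt (nums : List Int) (k : Int) : Int :=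
  if nums.sum < k * 2 then 0
  else
    let P : Int := 1000000007
    let n : Nat := nums.length
    let r := altSmall k P nums 0 0 PySem.Dict.empty
    PySem.Int.mod (PySem.Int.powMod 2 n P - 2 * r.1) P

-- ===== PRECONDITION & SPEC =====
-- Pre_ excludes exactly the inputs where Python A raises IndexError: when the early
-- return is not taken (sum ≥ 2k), A needs k ≥ 1 (for f[0][0] = 1) and all elements
-- nonnegative (a negative element makes j - nums[i-1] reach index k).
def Pre_count_partitions_dp (nums : List Int) (k : Int) : Prop :=
  nums.sum < k * 2 ∨ (1 ≤ k ∧ ∀ x ∈ nums, 0 ≤ x)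
instance (nums : List Int) (k : Int) : Decidable (Pre_count_partitions_dp nums k) := by
  unfold Pre_count_partitions_dp; infer_instance

def pvWitness_count_partitions_dp : List Int × Int := ([2, 2, 2], 2)

def Spec_count_partitions_dp (nums : List Int) (k : Int) (out : Int) : Prop := out = count_partitions_dp_alt nums k
instance (nums : List Int) (k : Int) (out : Int) : Decidable (Spec_count_partitions_dp nums k out) := by unfold Spec_count_partitions_dp; infer_instance

-- ===== CLAIM (what is proved, stated in full; the proofs are below) =====
def Claim_equal_count_partitions_dp : Prop := ∀ (nums : List Int) (k : Int), Dom_count_partitions_dp nums k → Pre_count_partitions_dp nums k → Spec_count_partitions_dp nums k (count_partitions_dp nums k)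

-- ===== LEMMAS AND PROOFS =====

def Pc : Int := 1000000007

-- Wc l j = number of subsets of l with sum j (the quantity A's table rows reduce mod Pc).
def Wc : List Int → Int → Int
  | [], j => if j = 0 then 1 else 0
  | x :: l, j => Wc l j + Wc l (j - x)

theorem Wc_neg (l : List Int) (j : Int) (hl : ∀ x ∈ l, 0 ≤ x) (hj : j < 0) : Wc l j = 0 := by
  induction l generalizing j with
  | nil => simp [Wc, hj.ne]
  | cons x l ih =>
      have hx : 0 ≤ x := hl x (by simp)
      have h1 := ih j (fun y hy => hl y (List.mem_cons_of_mem _ hy)) hj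
      have h2 := ih (j - x) (fun y hy => hl y (List.mem_cons_of_mem _ hy)) (by omega)
      simp [Wc, h1, h2]

theorem Wc_snoc (l : List Int) (x j : Int) : Wc (l ++ [x]) j = Wc l j + Wc l (j - x) := by
  induction l generalizing j with
  | nil => simp [Wc]
  | cons y l ih =>
      have h1 := ih j
      have h2 := ih (j - y)
      simp only [List.cons_append, Wc, h1, h2]
      have : j - x - y = j - y - x := by ring
      rw [this]; ring

def rowOf (k : Int) (p : List Int) : List Int :=
  (PySem.List.pyRange 0 k 1).map (fun j => PySem.Int.mod (Wc p j) Pc)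

theorem row0_eq (k : Int) (hk : 1 ≤ k) :
    PySem.List.pySetD (List.replicate k.toNat 0) 0 1 = rowOf k [] := by
  rw [PySem.List.pySetD_of_nonneg (List.replicate k.toNat 0) 1 le_rfl]
  apply List.ext_getElem
  · simp [rowOf, PySem.List.length_pyRange_one]
  · intro i h1 h2
    simp only [rowOf, PySem.List.pyRange_one, List.getElem_map, List.getElem_range,
      Int.toNat_zero, List.getElem_set, List.getElem_replicate]
    by_cases hi : i = 0
    · subst hi; simp [Wc]; decide
    · have hne : ((i:Int)) ≠ 0 := by exact_mod_cast hi
      rw [if_neg (fun h => hi h.symm)]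
      simp only [Wc, zero_add]
      rw [if_neg hne]
      decide

theorem mod_add_mod_eq (a b : Int) :
    PySem.Int.mod (PySem.Int.mod a Pc + PySem.Int.mod b Pc) Pc = PySem.Int.mod (a + b) Pc := by
  have hP : (0:Int) < Pc := by decide
  rw [PySem.Int.mod_eq_emod_of_pos hP, PySem.Int.mod_eq_emod_of_pos hP,
      PySem.Int.mod_eq_emod_of_pos hP, PySem.Int.mod_eq_emod_of_pos hP, ← Int.add_emod]

theorem A_loop (nums : List Int) (k : Int) (hk : 1 ≤ k) (hnn : ∀ x ∈ nums, 0 ≤ x)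
    (m : Nat) (hm : m ≤ nums.length) :
    (PySem.List.pyRange 1 ((m : Int) + 1) 1).foldl
        (fun (st : List (List Int) × Int) i =>
          let ans := PySem.Int.mod (st.2 * 2) Pc
          let prev := PySem.List.pyGetD st.1 (i - 1) []
          let x := PySem.List.pyGetD nums (i - 1) 0
          let row := (PySem.List.pyRange 0 k 1).foldl
            (fun row j =>
              let v := PySem.List.pyGetD prev j 0
              let v := if x ≤ j then PySem.Int.mod (v + PySem.List.pyGetD prev (j - x) 0) Pc else v
              row ++ [v]) []
          (st.1 ++ [row], ans))
        ([rowOf k []], 1)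
      = ((List.range (m + 1)).map (fun t => rowOf k (nums.take t)),
         PySem.Int.mod (2 ^ m) Pc) := by
  induction m with
  | zero =>
      rw [show ((0:Nat):Int) + 1 = 1 by norm_num, PySem.List.pyRange_one_eq_nil le_rfl]
      rw [Prod.ext_iff]
      exact ⟨by simp, by simp only [List.foldl_nil]; decide⟩
  | succ m ih =>
      have hm' : m ≤ nums.length := by omega
      have hcast : ((m + 1 : Nat) : Int) + 1 = ((m : Int) + 1) + 1 := by push_cast; ring
      rw [hcast, PySem.List.pyRange_one_succ_right (by omega), List.foldl_append, ih hm']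
      simp only [List.foldl_cons, List.foldl_nil]
      have hmlt : m < nums.length := by omega
      have hsub : ((m : Int) + 1) - 1 = (m : Int) := by ring
      have hx : PySem.List.pyGetD nums (((m : Int) + 1) - 1) 0 = nums[m] := by
        rw [hsub, PySem.List.pyGetD_natCast, List.getD_eq_getElem?_getD,
          List.getElem?_eq_getElem hmlt]
        rfl
      have hprev : PySem.List.pyGetD
          ((List.range (m + 1)).map (fun t => rowOf k (nums.take t))) (((m : Int) + 1) - 1) []
          = rowOf k (nums.take m) := by
        rw [hsub, PySem.List.pyGetD_natCast, List.getD_eq_getElem?_getD,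
          List.getElem?_map, List.getElem?_range (by omega)]
        rfl
      have htake : nums.take (m + 1) = nums.take m ++ [nums[m]] := by
        rw [List.take_succ, List.getElem?_eq_getElem hmlt]
        rfl
      have hxnn : 0 ≤ nums[m] := hnn _ (List.getElem_mem hmlt)
      rw [Prod.ext_iff]
      constructor
      · show _ ++ _ = _
        rw [hprev, hx, List.range_succ (n := m + 1), List.map_append]
        congr 1
        rw [PySem.List.foldl_append_singleton_eq_map
          (f := fun j => if nums[m] ≤ j then
              PySem.Int.mod (PySem.List.pyGetD (rowOf k (nums.take m)) j 0 +
                PySem.List.pyGetD (rowOf k (nums.take m)) (j - nums[m]) 0) Pc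
            else PySem.List.pyGetD (rowOf k (nums.take m)) j 0)]
        rw [List.nil_append, List.map_singleton, htake]
        congr 1
        show _ = (PySem.List.pyRange 0 k 1).map (fun j => PySem.Int.mod (Wc (nums.take m ++ [nums[m]]) j) Pc)
        apply List.map_congr_left
        intro j hj
        obtain ⟨hj0, hjk⟩ := PySem.List.mem_pyRange_one.mp hj
        have hprevj : PySem.List.pyGetD (rowOf k (nums.take m)) j 0
            = PySem.Int.mod (Wc (nums.take m) j) Pc :=
          PySem.List.pyGetD_map_pyRange_of_nonneg _ k j 0 hj0 hjk
        by_cases hcmp : nums[m] ≤ j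
        · have hprevjx : PySem.List.pyGetD (rowOf k (nums.take m)) (j - nums[m]) 0
              = PySem.Int.mod (Wc (nums.take m) (j - nums[m])) Pc :=
            PySem.List.pyGetD_map_pyRange_of_nonneg _ k (j - nums[m]) 0 (by omega) (by omega)
          rw [if_pos hcmp, hprevj, hprevjx, mod_add_mod_eq, Wc_snoc]
        · have hneg : Wc (nums.take m) (j - nums[m]) = 0 :=
            Wc_neg _ _ (fun y hy => hnn y (List.mem_of_mem_take hy)) (by omega)
          rw [if_neg hcmp, hprevj, Wc_snoc, hneg, add_zero]
      · show PySem.Int.mod (PySem.Int.mod (2 ^ m) Pc * 2) Pc = PySem.Int.mod (2 ^ (m + 1)) Pc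
        have hP : (0:Int) < Pc := by decide
        rw [PySem.Int.mod_eq_emod_of_pos hP, PySem.Int.mod_eq_emod_of_pos hP,
          PySem.Int.mod_eq_emod_of_pos hP, pow_succ,
          Int.mul_emod (2 ^ m % Pc) 2, Int.emod_emod_of_dvd _ dvd_rfl, ← Int.mul_emod]

theorem final_mod (X S : Int) :
    PySem.Int.mod (X - S * 2 + Pc) Pc = PySem.Int.mod (X - 2 * PySem.Int.mod S Pc) Pc := by
  have hP : (0:Int) < Pc := by decide
  rw [PySem.Int.mod_eq_emod_of_pos hP, PySem.Int.mod_eq_emod_of_pos hP,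
    PySem.Int.mod_eq_emod_of_pos hP]
  have h1 : X - S * 2 + Pc = (X - S * 2) + Pc * 1 := by ring
  rw [h1, Int.add_mul_emod_self_left, Int.sub_emod X (S * 2), Int.sub_emod X (2 * (S % Pc)),
    Int.mul_emod S 2, Int.mul_emod 2 (S % Pc), Int.emod_emod_of_dvd _ dvd_rfl,
    mul_comm (S % Pc) (2 % Pc)]

-- ----- B-side: the pure recursion behind the memoized closure -----

-- gg is small(i, s) without the memo; cnt is gg without the modular reduction.
def gg (k : Int) : List Int → Int → Int
  | l, s =>
    if k ≤ s then 0
    else match l with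
      | [] => 1
      | x :: t => PySem.Int.mod (gg k t s + gg k t (s + x)) Pc

def cnt (k : Int) : List Int → Int → Int
  | l, s =>
    if k ≤ s then 0
    else match l with
      | [] => 1
      | x :: t => cnt k t s + cnt k t (s + x)

theorem gg_eq_mod_cnt (k : Int) (l : List Int) (s : Int) :
    gg k l s = PySem.Int.mod (cnt k l s) Pc := by
  induction l generalizing s with
  | nil =>
      simp only [gg, cnt]
      split
      · decide
      · decide
  | cons x t ih =>
      simp only [gg, cnt]
      split
      · decide
      · rw [ih s, ih (s + x), mod_add_mod_eq]

-- memo correctness: every entry (i, s) ↦ v of the threaded dict is gg of the suffix at i.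
def GoodM (k : Int) (nums : List Int) (m : PySem.Dict (Int × Int) Int) : Prop :=
  ∀ i s v, m.get? (i, s) = some v → v = gg k (nums.drop i.toNat) s

theorem altSmall_spec (k : Int) (nums : List Int) :
    ∀ (l : List Int) (i s : Int) (m : PySem.Dict (Int × Int) Int),
      0 ≤ i → nums.drop i.toNat = l → GoodM k nums m →
      (altSmall k Pc l i s m).1 = gg k l s ∧ GoodM k nums (altSmall k Pc l i s m).2 := by
  intro l
  induction l with
  | nil =>
      intro i s m _ _ hm
      simp only [altSmall, gg]
      split
      · exact ⟨rfl, hm⟩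
      · exact ⟨rfl, hm⟩
  | cons x t ih =>
      intro i s m hi hdrop hm
      have hi1 : (i + 1).toNat = i.toNat + 1 := by omega
      have hdrop1 : nums.drop (i + 1).toNat = t := by
        rw [hi1, ← List.tail_drop, hdrop]; rfl
      by_cases hks : k ≤ s
      · constructor
        · simp only [altSmall, gg, if_pos hks]
        · simp only [altSmall, if_pos hks]; exact hm
      · simp only [altSmall, gg, if_neg hks]
        cases hget : m.get? (i, s) with
        | some v =>
            refine ⟨?_, hm⟩
            have := hm i s v hget
            rw [hdrop] at this
            simpa [gg, if_neg hks] using this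
        | none =>
            obtain ⟨h1, hm1⟩ := ih (i + 1) s m (by omega) hdrop1 hm
            obtain ⟨h2, hm2⟩ := ih (i + 1) (s + x) _ (by omega) hdrop1 hm1
            refine ⟨by rw [h1, h2], ?_⟩
            intro i' s' v' hget'
            rw [PySem.Dict.get?_insert] at hget'
            by_cases heq : (i', s') = (i, s)
            · rw [if_pos heq] at hget'
              obtain ⟨hi', hs'⟩ := Prod.mk.injEq .. ▸ heq
              have : v' = PySem.Int.mod ((altSmall k Pc t (i + 1) s m).1 +
                  (altSmall k Pc t (i + 1) (s + x) (altSmall k Pc t (i + 1) s m).2).1) Pc := by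
                exact (Option.some.injEq .. ▸ hget').symm
              rw [this, h1, h2]
              cases heq
              rw [hdrop]
              simp [gg, if_neg hks]
            · rw [if_neg heq] at hget'
              exact hm2 i' s' v' hget'

-- cnt equals the partial sum of Wc counts below the remaining budget.
def SW (l : List Int) (m : Int) : Int := ((PySem.List.pyRange 0 m 1).map (Wc l)).sum

theorem SW_nonpos (l : List Int) (m : Int) (hm : m ≤ 0) : SW l m = 0 := by
  unfold SW
  rw [PySem.List.pyRange_one_eq_nil hm]
  rfl

theorem SW_succ (l : List Int) (m : Int) (hm : 0 ≤ m) :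
    SW l (m + 1) = SW l m + Wc l m := by
  unfold SW
  rw [PySem.List.pyRange_one_succ_right hm, List.map_append, List.sum_append]
  simp

theorem shift_sum (t : List Int) (ht : ∀ y ∈ t, 0 ≤ y) (x : Int) (hx : 0 ≤ x) (m : Int) :
    ((PySem.List.pyRange 0 m 1).map (fun j => Wc t (j - x))).sum = SW t (m - x) := by
  by_cases hm : m ≤ 0
  · rw [PySem.List.pyRange_one_eq_nil hm, SW_nonpos t _ (by omega)]
    rfl
  · push_neg at hm
    obtain ⟨M, hM⟩ : ∃ M : Nat, m = (M : Int) := ⟨m.toNat, by omega⟩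
    subst hM
    clear hm
    induction M with
    | zero =>
        rw [show ((0:Nat):Int) = 0 by norm_num, PySem.List.pyRange_one_eq_nil le_rfl,
          SW_nonpos t _ (by omega)]
        rfl
    | succ M ihM =>
        have hcast : ((M + 1 : Nat) : Int) = (M : Int) + 1 := by push_cast; ring
        rw [hcast, PySem.List.pyRange_one_succ_right (by positivity), List.map_append,
          List.sum_append, ihM]
        simp only [List.map_singleton, List.sum_singleton]
        by_cases hxM : x ≤ (M : Int)
        · have : (M : Int) + 1 - x = ((M : Int) - x) + 1 := by ring
          rw [this, SW_succ t _ (by omega)]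
        · have h1 : Wc t ((M : Int) - x) = 0 := Wc_neg t _ ht (by omega)
          rw [h1, SW_nonpos t _ (by omega), SW_nonpos t _ (by omega)]
          norm_num

theorem sum_map_add_split (L : List Int) (f g : Int → Int) :
    (L.map (fun j => f j + g j)).sum = (L.map f).sum + (L.map g).sum := by
  induction L with
  | nil => simp
  | cons a L ih => simp [ih]; ring

theorem cnt_eq_SW (k : Int) (l : List Int) (hl : ∀ y ∈ l, 0 ≤ y) (s : Int) :
    cnt k l s = SW l (k - s) := by
  induction l generalizing s with
  | nil =>
      simp only [cnt]
      by_cases hks : k ≤ s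
      · rw [if_pos hks, SW_nonpos _ _ (by omega)]
      · rw [if_neg hks]
        unfold SW
        rw [PySem.List.pyRange_one_cons (by omega)]
        simp only [List.map_cons, List.sum_cons]
        rw [show (0:Int) + 1 = 1 by norm_num]
        have h0 : Wc [] 0 = 1 := by simp [Wc]
        have hz : ((PySem.List.pyRange 1 (k - s) 1).map (Wc [])).sum = 0 := by
          apply List.sum_eq_zero
          intro y hy
          obtain ⟨j, hj, rfl⟩ := List.mem_map.mp hy
          obtain ⟨hj1, _⟩ := PySem.List.mem_pyRange_one.mp hj
          simp [Wc]
          omega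
        rw [h0, hz]
        norm_num
  | cons x t ih =>
      have hx : 0 ≤ x := hl x (by simp)
      have ht : ∀ y ∈ t, 0 ≤ y := fun y hy => hl y (List.mem_cons_of_mem _ hy)
      simp only [cnt]
      by_cases hks : k ≤ s
      · rw [if_pos hks, SW_nonpos _ _ (by omega)]
      · rw [if_neg hks, ih ht s, ih ht (s + x)]
        have hshift := shift_sum t ht x hx (k - s)
        rw [show k - (s + x) = (k - s) - x by ring, ← hshift]
        unfold SW
        rw [← sum_map_add_split]
        apply congrArg
        apply List.map_congr_left
        intro j _
        rfl

theorem mod_sum_reduce (L : List Int) (f : Int → Int) :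
    PySem.Int.mod ((L.map (fun j => PySem.Int.mod (f j) Pc)).sum) Pc
      = PySem.Int.mod ((L.map f).sum) Pc := by
  have hP : (0:Int) < Pc := by decide
  induction L with
  | nil => rfl
  | cons a L ih =>
      simp only [List.map_cons, List.sum_cons]
      rw [PySem.Int.mod_eq_emod_of_pos hP, PySem.Int.mod_eq_emod_of_pos hP] at ih ⊢
      rw [PySem.Int.mod_eq_emod_of_pos hP]
      rw [Int.add_emod, Int.emod_emod_of_dvd _ dvd_rfl, ih, ← Int.add_emod]

-- ===== VERDICT (by name: the statement is the Claim_ definition above) =====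
theorem count_partitions_dp_spec : Claim_equal_count_partitions_dp := by
  unfold Claim_equal_count_partitions_dp
  intro nums k _ hpre
  unfold Spec_count_partitions_dp
  simp only [count_partitions_dp, count_partitions_dp_alt]
  by_cases hsum : nums.sum < k * 2
  · rw [if_pos hsum, if_pos hsum]
  · rw [if_neg hsum, if_neg hsum]
    obtain ⟨hk, hnn⟩ : 1 ≤ k ∧ ∀ x ∈ nums, 0 ≤ x := hpre.resolve_left hsum
    rw [show (1000000007 : Int) = Pc from rfl]
    rw [row0_eq k hk, A_loop nums k hk hnn nums.length le_rfl]
    have hempty : GoodM k nums PySem.Dict.empty := by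
      intro i s v h
      rw [PySem.Dict.get?_empty] at h
      exact absurd h (by simp)
    obtain ⟨hval, _⟩ := altSmall_spec k nums nums 0 0 PySem.Dict.empty le_rfl (by simp) hempty
    rw [hval, gg_eq_mod_cnt, cnt_eq_SW k nums hnn 0]
    rw [show PySem.Int.powMod 2 nums.length Pc = PySem.Int.mod (2 ^ nums.length) Pc from rfl]
    rw [List.range_succ, List.map_append, List.map_singleton,
      PySem.List.pyGetD_neg_one_append_singleton, List.take_length]
    rw [final_mod]
    unfold rowOf SW
    rw [show k - 0 = k by ring, mod_sum_reduce]
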